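-- pv_equiv track=rewrite | github.com/iinshot/computer-modeling | computer_simulation/lemar_modified.py | lemar_modified
-- ===== SOURCE A (Python) =====
-- def lemar_modified(a, m, x0, n):
--     sequence = [x0]
--     seen = {x0: 0}
--     repeat_position = None
--     for i in range(1, n):
--         next_val = (a * x0) % m
--         if next_val in seen and repeat_position is None:
--             repeat_position = i
--         seen[next_val] = i
--         sequence.append(next_val)
--         x0 = next_val
--         if repeat_position is not None and i >= repeat_position + 5:
--             break
--     return sequence, repeat_position
-- ===== SOURCE B (Python) =====
-- def lemar_modified(a, m, x0, n):
--     # Floyd (tortoise/hare) cycle detection instead of a seen-dictionary: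
--     # find a meeting point, then tail length mu and cycle length lam;
--     # the first repeated value occurs at index mu + lam.
--     k = None
--     tort = hare = x0
--     for i in range(1, n):
--         tort = (a * tort) % m
--         hare = (a * ((a * hare) % m)) % m
--         if tort == hare:
--             k = i
--             break
--     rp = None
--     if k is not None:
--         # tail length mu: two pointers k apart meet exactly at index mu
--         mu = 0
--         p, q = x0, tort
--         while p != q:
--             p = (a * p) % m
--             q = (a * q) % m
--             mu += 1
--         # cycle length lam: walk once around the cycle from index mu
--         lam = 1
--         r = (a * p) % m
--         while r != p:
--             r = (a * r) % m
--             lam += 1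
--         if mu + lam < n:
--             rp = mu + lam
--     # generate the returned prefix directly (no bookkeeping)
--     length = n if rp is None else min(n, rp + 6)
--     seq = [x0]
--     x = x0
--     for _ in range(max(length, 1) - 1):
--         x = (a * x) % m
--         seq.append(x)
--     return seq, rp
-- ===== Notes on version B (the rewrite author's own statement) =====
-- stated objective: alternative
-- what changed: The seen-dictionary single pass is replaced by Floyd's tortoise-and-hare cycle detection: B finds a meeting point with two pointers, derives tail length mu and cycle length lam (first repeat = mu+lam, None if >= n), then generates the output prefix by plain iteration with no membership bookkeeping at all.
import Mathlib
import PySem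

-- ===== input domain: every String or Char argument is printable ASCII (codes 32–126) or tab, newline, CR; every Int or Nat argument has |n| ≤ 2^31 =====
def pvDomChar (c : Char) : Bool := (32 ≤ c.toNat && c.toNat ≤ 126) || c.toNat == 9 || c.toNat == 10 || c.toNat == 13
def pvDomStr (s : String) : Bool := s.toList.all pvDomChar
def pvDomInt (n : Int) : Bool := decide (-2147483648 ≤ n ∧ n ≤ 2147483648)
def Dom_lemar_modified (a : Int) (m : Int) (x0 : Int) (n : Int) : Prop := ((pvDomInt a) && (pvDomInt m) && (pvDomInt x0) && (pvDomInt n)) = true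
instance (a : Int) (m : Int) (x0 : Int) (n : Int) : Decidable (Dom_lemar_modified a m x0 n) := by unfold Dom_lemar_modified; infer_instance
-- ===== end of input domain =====

-- B replaces A's seen-dictionary pass by Floyd tortoise-and-hare cycle detection (meeting
-- point, then tail length mu and cycle length lam; first repeat = mu+lam) plus a plain
-- generation loop; alternative algorithm, no membership bookkeeping; proved equal for m ≠ 0.


-- ===== PORT A =====
-- A's for-loop over range(1, n) with an early break, as a counted loop (fuel = n.toNat)
-- carrying (i, x0, sequence, seen, repeat_position).
def lemarLoopA (a : Int) (m : Int) (n : Int) : Nat → Int → Int → List Int →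
    PySem.Dict Int Int → Option Int → List Int × Option Int
  | 0, _, _, seq, _, rp => (seq, rp)
  | fuel + 1, i, x, seq, seen, rp =>
    if i < n then
      let nextVal := PySem.Int.mod (a * x) m
      let rp' := if seen.contains nextVal && rp.isNone then some i else rp
      let seen' := seen.insert nextVal i
      let seq' := seq ++ [nextVal]
      match rp' with
      | some r => if i ≥ r + 5 then (seq', rp') else lemarLoopA a m n fuel (i + 1) nextVal seq' seen' rp'
      | none => lemarLoopA a m n fuel (i + 1) nextVal seq' seen' rp'
    else (seq, rp)

def lemar_modified (a : Int) (m : Int) (x0 : Int) (n : Int) : List Int × Option Int :=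
  lemarLoopA a m n n.toNat 1 x0 [x0] (PySem.Dict.empty.insert x0 0) none

-- ===== PORT B =====
-- B phase 1: Floyd meeting loop 'for i in range(1, n)' — tortoise one step, hare two steps,
-- break at the first meeting, returning (i, tortoise) or none.
def lemarMeet (a : Int) (m : Int) (n : Int) : Nat → Int → Int → Int → Option (Int × Int)
  | 0, _, _, _ => none
  | fuel + 1, i, tort, hare =>
    if i < n then
      let tort' := PySem.Int.mod (a * tort) m
      let hare' := PySem.Int.mod (a * PySem.Int.mod (a * hare) m) m
      if tort' == hare' then some (i, tort')
      else lemarMeet a m n fuel (i + 1) tort' hare'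
    else none

-- B's 'while p != q' walk for the tail length mu (fuel is an upper bound, proved sufficient).
def lemarMu (a : Int) (m : Int) : Nat → Int → Int → Nat → Int × Nat
  | 0, p, _, mu => (p, mu)
  | fuel + 1, p, q, mu =>
    if p == q then (p, mu)
    else lemarMu a m fuel (PySem.Int.mod (a * p) m) (PySem.Int.mod (a * q) m) (mu + 1)

-- B's 'while r != p' walk for the cycle length lam.
def lemarLam (a : Int) (m : Int) : Nat → Int → Int → Nat → Nat
  | 0, _, _, lam => lam
  | fuel + 1, r, p, lam =>
    if r == p then lam
    else lemarLam a m fuel (PySem.Int.mod (a * r) m) p (lam + 1)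

-- B's final generation loop: 'for _ in range(max(length, 1) - 1)'.
def lemarGen (a : Int) (m : Int) : Nat → Int → List Int → List Int
  | 0, _, seq => seq
  | c + 1, x, seq =>
    let x' := PySem.Int.mod (a * x) m
    lemarGen a m c x' (seq ++ [x'])

-- B's 'if k is not None' block: derive rp from the meeting (or None).
def lemarRP (a : Int) (m : Int) (n : Int) (x0 : Int) : Option (Int × Int) → Option Int
  | none => none
  | some kt =>
      let pm := lemarMu a m n.toNat x0 kt.2 0
      let lam := lemarLam a m n.toNat (PySem.Int.mod (a * pm.1) m) pm.1 1
      if (pm.2 : Int) + (lam : Int) < n then some ((pm.2 : Int) + (lam : Int)) else none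

-- B's 'length = n if rp is None else min(n, rp + 6)'.
def lemarLen (n : Int) : Option Int → Int
  | none => n
  | some r => min n (r + 6)

def lemar_modified_alt (a : Int) (m : Int) (x0 : Int) (n : Int) : List Int × Option Int :=
  let rp := lemarRP a m n x0 (lemarMeet a m n n.toNat 1 x0 x0)
  (lemarGen a m (max (lemarLen n rp) 1 - 1).toNat x0 [x0], rp)

-- ===== PRECONDITION & SPEC =====
-- Pre_ excludes exactly the inputs where Python A raises ZeroDivisionError: m = 0 with n ≥ 2
-- (for n ≤ 1 the loop body never runs, so no division happens even when m = 0).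
def Pre_lemar_modified (a : Int) (m : Int) (x0 : Int) (n : Int) : Prop := m ≠ 0 ∨ n ≤ 1
instance (a : Int) (m : Int) (x0 : Int) (n : Int) : Decidable (Pre_lemar_modified a m x0 n) := by unfold Pre_lemar_modified; infer_instance
def pvWitness_lemar_modified : Int × Int × Int × Int := (5, 7, 3, 12)

def Spec_lemar_modified (a : Int) (m : Int) (x0 : Int) (n : Int) (out : List Int × Option Int) : Prop := out = lemar_modified_alt a m x0 n
instance (a : Int) (m : Int) (x0 : Int) (n : Int) (out : List Int × Option Int) : Decidable (Spec_lemar_modified a m x0 n out) := by unfold Spec_lemar_modified; infer_instance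

-- ===== CLAIM (what is proved, stated in full; the proofs are below) =====
def Claim_equal_lemar_modified : Prop := ∀ (a : Int) (m : Int) (x0 : Int) (n : Int), Dom_lemar_modified a m x0 n → Pre_lemar_modified a m x0 n → Spec_lemar_modified a m x0 n (lemar_modified a m x0 n)

-- ===== LEMMAS AND PROOFS =====

-- The mathematical reference: s i = the i-th value of the recurrence x ← (a*x) % m.
def pvF (a : Int) (m : Int) (x : Int) : Int := PySem.Int.mod (a * x) m
def pvS (a : Int) (m : Int) (x0 : Int) (i : Nat) : Int := (pvF a m)^[i] x0
-- pvP r: the value at index r already occurred strictly before r.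
def pvP (a : Int) (m : Int) (x0 : Int) (r : Nat) : Prop := ∃ j < r, pvS a m x0 j = pvS a m x0 r

theorem pvS_succ (a m x0 : Int) (i : Nat) : pvS a m x0 (i + 1) = pvF a m (pvS a m x0 i) := by
  simp [pvS, Function.iterate_succ_apply']

theorem pvS_step (a m x0 : Int) (i : Nat) :
    PySem.Int.mod (a * pvS a m x0 i) m = pvS a m x0 (i + 1) := by
  rw [pvS_succ]; rfl

theorem pvS_add (a m x0 : Int) (d i : Nat) : pvS a m x0 (d + i) = (pvF a m)^[d] (pvS a m x0 i) := by
  simp [pvS, Function.iterate_add_apply]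

-- period propagation: a coincidence s (b+p) = s b propagates to every later index.
theorem pvPer1 (a m x0 : Int) (b p : Nat) (h : pvS a m x0 (b + p) = pvS a m x0 b)
    (j : Nat) (hj : b ≤ j) : pvS a m x0 (j + p) = pvS a m x0 j := by
  have e1 : j + p = (j - b) + (b + p) := by omega
  have e2 : j = (j - b) + b := by omega
  rw [e1, pvS_add, h, ← pvS_add, ← e2]

theorem pvPerQ (a m x0 : Int) (b p : Nat) (h : pvS a m x0 (b + p) = pvS a m x0 b)
    (q j : Nat) (hj : b ≤ j) : pvS a m x0 (j + q * p) = pvS a m x0 j := by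
  induction q with
  | zero => simp
  | succ q ih =>
    have : j + (q + 1) * p = (j + q * p) + p := by ring
    rw [this, pvPer1 a m x0 b p h _ (by omega), ih]

-- index reduction into the fundamental cycle window [b, b+p).
theorem pvRed (a m x0 : Int) (b p : Nat) (h : pvS a m x0 (b + p) = pvS a m x0 b)
    (hp : 1 ≤ p) (j : Nat) (hj : b ≤ j) : pvS a m x0 j = pvS a m x0 (b + (j - b) % p) := by
  have e : (b + (j - b) % p) + ((j - b) / p) * p = j := by
    have h2 : p * ((j - b) / p) + (j - b) % p = j - b := Nat.div_add_mod _ _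
    have h3 : (j - b) / p * p = p * ((j - b) / p) := Nat.mul_comm _ _
    omega
  calc pvS a m x0 j = pvS a m x0 ((b + (j - b) % p) + ((j - b) / p) * p) := by rw [e]
    _ = pvS a m x0 (b + (j - b) % p) := pvPerQ a m x0 b p h _ _ (by omega)

-- Bundle hypotheses: mu + lam is the first repeat index R, i.e.
-- hcyc : s (mu+lam) = s mu, hl1 : 1 ≤ lam, hinj : s injective on [0, mu+lam).

-- any k ≥ mu that is a multiple of lam is a Floyd meeting point.
theorem pvMeetOf (a m x0 : Int) (mu lam : Nat)
    (hcyc : pvS a m x0 (mu + lam) = pvS a m x0 mu)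
    (k : Nat) (hdvd : lam ∣ k) (hmk : mu ≤ k) : pvS a m x0 (2 * k) = pvS a m x0 k := by
  obtain ⟨q, hq⟩ := hdvd
  have hc : lam * q = q * lam := Nat.mul_comm _ _
  have e : 2 * k = k + q * lam := by omega
  rw [e, pvPerQ a m x0 mu lam hcyc _ _ hmk]

-- conversely every Floyd meeting point is a multiple of lam, at or past mu.
theorem pvDivMeet (a m x0 : Int) (mu lam : Nat)
    (hcyc : pvS a m x0 (mu + lam) = pvS a m x0 mu) (hl1 : 1 ≤ lam)
    (hinj : ∀ i j : Nat, i < j → j < mu + lam → pvS a m x0 i ≠ pvS a m x0 j)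
    (k : Nat) (hk1 : 1 ≤ k) (hm : pvS a m x0 k = pvS a m x0 (2 * k)) :
    lam ∣ k ∧ mu ≤ k := by
  have hkk : pvS a m x0 (k + k) = pvS a m x0 k := by
    have : k + k = 2 * k := by omega
    rw [this]; exact hm.symm
  have kper : ∀ j : Nat, k ≤ j → pvS a m x0 (j + k) = pvS a m x0 j := by
    intro j hj
    have := pvPerQ a m x0 k k hkk 1 j hj
    simpa using this
  have hdvd : lam ∣ k := by
    set j0 := max k mu with hj0
    set r := k % lam with hr
    have hrlt : r < lam := Nat.mod_lt _ (by omega)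
    have hstep : pvS a m x0 (j0 + r) = pvS a m x0 j0 := by
      have h1 : pvS a m x0 ((j0 + r) + (k / lam) * lam) = pvS a m x0 (j0 + r) :=
        pvPerQ a m x0 mu lam hcyc _ _ (by omega)
      have h2 : (j0 + r) + (k / lam) * lam = j0 + k := by
        have := Nat.mod_add_div k lam
        have h3 : k / lam * lam = lam * (k / lam) := Nat.mul_comm _ _
        omega
      rw [h2] at h1
      rw [← h1, kper j0 (by omega)]
    have e1 := pvRed a m x0 mu lam hcyc hl1 (j0 + r) (by omega)
    have e2 := pvRed a m x0 mu lam hcyc hl1 j0 (by omega)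
    have heq : pvS a m x0 (mu + (j0 + r - mu) % lam) = pvS a m x0 (mu + (j0 - mu) % lam) := by
      rw [← e1, ← e2, hstep]
    have hmod : (j0 + r - mu) % lam = (j0 - mu) % lam := by
      by_contra hne
      rcases Nat.lt_or_ge ((j0 + r - mu) % lam) ((j0 - mu) % lam) with hlt | hge
      · exact hinj _ _ (by omega) (by have := Nat.mod_lt (j0 - mu) (show 0 < lam by omega); omega) heq
      · exact hinj _ _ (by omega) (by have := Nat.mod_lt (j0 + r - mu) (show 0 < lam by omega); omega) heq.symm
    have hdr : lam ∣ r := by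
      have hmu : mu ≤ j0 := by omega
      have hmeq : (j0 - mu) % lam = ((j0 - mu) + r) % lam := by
        have : j0 + r - mu = (j0 - mu) + r := by omega
        rw [← this, hmod]
      have := (Nat.modEq_iff_dvd' (Nat.le_add_right (j0 - mu) r)).mp hmeq
      simpa using this
    have : r = 0 := by
      rcases Nat.eq_zero_or_pos r with h | h
      · exact h
      · exact absurd (Nat.le_of_dvd h hdr) (by omega)
    exact Nat.dvd_of_mod_eq_zero (by omega)
  refine ⟨hdvd, ?_⟩
  by_contra hlt
  push_neg at hlt
  have hmu1 : 1 ≤ mu := by omega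
  have e1 : pvS a m x0 ((mu - 1 + lam) + k) = pvS a m x0 (mu - 1 + lam) := kper _ (by omega)
  have e2 : pvS a m x0 ((mu - 1 + k) + lam) = pvS a m x0 (mu - 1 + k) :=
    pvPer1 a m x0 mu lam hcyc _ (by omega)
  have e3 : pvS a m x0 ((mu - 1) + k) = pvS a m x0 (mu - 1) := kper _ (by omega)
  have echain : pvS a m x0 (mu - 1 + lam) = pvS a m x0 (mu - 1) := by
    have h12 : (mu - 1 + lam) + k = (mu - 1 + k) + lam := by omega
    rw [← e1, h12, e2, e3]
  exact hinj (mu - 1) (mu - 1 + lam) (by omega) (by omega) echain.symm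

-- the two-pointer walk p = s j, q = s (j+k) meets exactly at index mu.
theorem pvMuIff (a m x0 : Int) (mu lam : Nat)
    (hcyc : pvS a m x0 (mu + lam) = pvS a m x0 mu) (hl1 : 1 ≤ lam)
    (hinj : ∀ i j : Nat, i < j → j < mu + lam → pvS a m x0 i ≠ pvS a m x0 j)
    (k : Nat) (hdvd : lam ∣ k) (hmk : mu ≤ k) (j : Nat) :
    pvS a m x0 j = pvS a m x0 (j + k) ↔ mu ≤ j := by
  constructor
  · intro h
    by_contra hj
    push_neg at hj
    have hper : pvS a m x0 ((j + k) + lam) = pvS a m x0 (j + k) :=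
      pvPer1 a m x0 mu lam hcyc _ (by omega)
    have hchain : pvS a m x0 (j + lam) = pvS a m x0 j := by
      have h1 : pvS a m x0 (j + lam) = (pvF a m)^[lam] (pvS a m x0 j) := by
        have : j + lam = lam + j := by omega
        rw [this, pvS_add]
      have h2 : pvS a m x0 ((j + k) + lam) = (pvF a m)^[lam] (pvS a m x0 (j + k)) := by
        have : (j + k) + lam = lam + (j + k) := by omega
        rw [this, pvS_add]
      rw [h1, h, ← h2, hper, ← h]
    exact hinj j (j + lam) (by omega) (by omega) hchain.symm
  · intro h
    obtain ⟨q, hq⟩ := hdvd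
    have hc : lam * q = q * lam := Nat.mul_comm _ _
    have e : j + k = j + q * lam := by omega
    rw [e, pvPerQ a m x0 mu lam hcyc _ _ h]

-- appending the next value extends the mapped prefix by one.
theorem pvMapSucc (a m x0 : Int) (jN : Nat) (seq : List Int)
    (h : seq = (List.range jN).map (pvS a m x0)) :
    seq ++ [pvS a m x0 jN] = (List.range (jN + 1)).map (pvS a m x0) := by
  have hr : (List.range (jN + 1)).map (pvS a m x0)
      = (List.range jN).map (pvS a m x0) ++ [pvS a m x0 jN] := by
    rw [List.range_succ]
    simp
  rw [h, hr]

-- inserting s jN into the seen dict extends the membership characterisation.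
theorem pvContainsInsert (a m x0 : Int) (jN : Nat) (i : Int) (seen : PySem.Dict Int Int)
    (hcont : ∀ v : Int, seen.contains v = true ↔ ∃ j < jN, pvS a m x0 j = v) :
    ∀ v : Int, ((seen.insert (pvS a m x0 jN) i).contains v = true) ↔ ∃ j < jN + 1, pvS a m x0 j = v := by
  intro v
  rw [PySem.Dict.contains_insert]
  simp only [Bool.or_eq_true, beq_iff_eq]
  constructor
  · rintro (h | h)
    · exact ⟨jN, by omega, h.symm⟩
    · obtain ⟨j, hj, he⟩ := (hcont v).mp h
      exact ⟨j, by omega, he⟩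
  · rintro ⟨j, hj, he⟩
    by_cases hjj : j = jN
    · left
      rw [← he, hjj]
    · right
      exact (hcont v).mpr ⟨j, by omega, he⟩

-- A's loop once repeat_position = some R is frozen: it only appends until min(n, R+6).
theorem lemarLoopA_some (a m x0 n : Int) (R : Nat) :
    ∀ (fuel jN : Nat) (x : Int) (seq : List Int) (seen : PySem.Dict Int Int),
      n.toNat ≤ fuel + jN → 1 ≤ jN → jN ≤ n.toNat → jN ≤ R + 5 →
      x = pvS a m x0 (jN - 1) → seq = (List.range jN).map (pvS a m x0) →
      lemarLoopA a m n fuel (jN : Int) x seq seen (some (R : Int)) =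
        ((List.range (min n.toNat (R + 6))).map (pvS a m x0), some (R : Int)) := by
  intro fuel
  induction fuel with
  | zero =>
    intro jN x seq seen hf h1 hN hR5 hx hseq
    have hj : min n.toNat (R + 6) = jN := by omega
    simp only [lemarLoopA, hj, hseq]
  | succ fuel ih =>
    intro jN x seq seen hf h1 hN hR5 hx hseq
    by_cases hlt : jN < n.toNat
    · have hlt' : (jN : Int) < n := by omega
      have hnext : PySem.Int.mod (a * x) m = pvS a m x0 jN := by
        rw [hx, pvS_step]; congr 1; omega
      simp only [lemarLoopA, if_pos hlt', Option.isNone_some, Bool.and_false,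
        Bool.false_eq_true, if_false]
      by_cases hbrk : R + 5 ≤ jN
      · rw [if_pos (show (jN : Int) ≥ (R : Int) + 5 by push_cast; omega)]
        have hmin : min n.toNat (R + 6) = jN + 1 := by omega
        rw [hnext, pvMapSucc a m x0 jN seq hseq, hmin]
      · rw [if_neg (show ¬ ((jN : Int) ≥ (R : Int) + 5) by push_cast; omega)]
        have e1 : ((jN : Int) + 1) = ((jN + 1 : Nat) : Int) := by push_cast; ring
        rw [hnext, e1]
        exact ih (jN + 1) _ _ _ (by omega) (by omega) (by omega) (by omega)
          (by congr 1) (pvMapSucc a m x0 jN seq hseq)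
    · have hj : min n.toNat (R + 6) = jN := by omega
      simp only [lemarLoopA, if_neg (show ¬ ((jN : Int) < n) by omega), hj, hseq]

-- A's loop in the searching phase, case "no repeat occurs before n".
theorem lemarLoopA_none_no (a m x0 n : Int)
    (hno : ∀ r < n.toNat, ¬ pvP a m x0 r) :
    ∀ (fuel jN : Nat) (x : Int) (seq : List Int) (seen : PySem.Dict Int Int),
      n.toNat ≤ fuel + jN → 1 ≤ jN →
      x = pvS a m x0 (jN - 1) → seq = (List.range jN).map (pvS a m x0) →
      (∀ v : Int, seen.contains v = true ↔ ∃ j < jN, pvS a m x0 j = v) →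
      lemarLoopA a m n fuel (jN : Int) x seq seen none =
        ((List.range (max n.toNat jN)).map (pvS a m x0), none) := by
  intro fuel
  induction fuel with
  | zero =>
    intro jN x seq seen hf h1 hx hseq hcont
    have hj : max n.toNat jN = jN := by omega
    simp only [lemarLoopA, hj, hseq]
  | succ fuel ih =>
    intro jN x seq seen hf h1 hx hseq hcont
    by_cases hlt : jN < n.toNat
    · have hlt' : (jN : Int) < n := by omega
      have hnext : PySem.Int.mod (a * x) m = pvS a m x0 jN := by
        rw [hx, pvS_step]; congr 1; omega
      have hcf : seen.contains (PySem.Int.mod (a * x) m) = false := by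
        rw [hnext]
        by_contra hc
        have hct : seen.contains (pvS a m x0 jN) = true := by
          simpa using hc
        exact hno jN hlt ((hcont _).mp hct)
      simp only [lemarLoopA, if_pos hlt', Option.isNone_none, Bool.and_true, hcf,
        Bool.false_eq_true, if_false]
      have e1 : ((jN : Int) + 1) = ((jN + 1 : Nat) : Int) := by push_cast; ring
      rw [hnext, e1]
      have hmax : max n.toNat (jN + 1) = max n.toNat jN := by omega
      rw [← hmax]
      exact ih (jN + 1) _ _ _ (by omega) (by omega) (by congr 1)
        (pvMapSucc a m x0 jN seq hseq) (pvContainsInsert a m x0 jN _ seen hcont)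
    · have hj : max n.toNat jN = jN := by omega
      simp only [lemarLoopA, if_neg (show ¬ ((jN : Int) < n) by omega), hj, hseq]

-- A's loop in the searching phase, case "first repeat at R < n".
theorem lemarLoopA_none_rep (a m x0 n : Int) (R : Nat) (hRN : R < n.toNat)
    (hPR : pvP a m x0 R) :
    ∀ (fuel jN : Nat) (x : Int) (seq : List Int) (seen : PySem.Dict Int Int),
      n.toNat ≤ fuel + jN → 1 ≤ jN → jN ≤ R →
      x = pvS a m x0 (jN - 1) → seq = (List.range jN).map (pvS a m x0) →
      (∀ v : Int, seen.contains v = true ↔ ∃ j < jN, pvS a m x0 j = v) →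
      (∀ r : Nat, jN ≤ r → r < R → ¬ pvP a m x0 r) →
      lemarLoopA a m n fuel (jN : Int) x seq seen none =
        ((List.range (min n.toNat (R + 6))).map (pvS a m x0), some (R : Int)) := by
  intro fuel
  induction fuel with
  | zero => intro jN x seq seen hf h1 hjR hx hseq hcont hmid; omega
  | succ fuel ih =>
    intro jN x seq seen hf h1 hjR hx hseq hcont hmid
    have hlt : jN < n.toNat := by omega
    have hlt' : (jN : Int) < n := by omega
    have hnext : PySem.Int.mod (a * x) m = pvS a m x0 jN := by
      rw [hx, pvS_step]; congr 1; omega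
    by_cases hje : jN = R
    · have hct : seen.contains (PySem.Int.mod (a * x) m) = true := by
        rw [hnext]
        obtain ⟨j, hj, he⟩ := hPR
        exact (hcont _).mpr ⟨j, by omega, by rw [he, hje]⟩
      simp only [lemarLoopA, if_pos hlt', Option.isNone_none, Bool.and_true, hct, if_true]
      rw [if_neg (show ¬ ((jN : Int) ≥ (jN : Int) + 5) by omega)]
      have e1 : ((jN : Int) + 1) = ((jN + 1 : Nat) : Int) := by push_cast; ring
      have e2 : (jN : Int) = ((R : Nat) : Int) := by omega
      rw [hnext, e1, e2]
      exact lemarLoopA_some a m x0 n R fuel (jN + 1) _ _ _ (by omega) (by omega)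
        (by omega) (by omega) (by congr 1) (pvMapSucc a m x0 jN seq hseq)
    · have hct : seen.contains (PySem.Int.mod (a * x) m) = false := by
        rw [hnext]
        by_contra hc
        have hctt : seen.contains (pvS a m x0 jN) = true := by
          simpa using hc
        exact hmid jN (le_refl jN) (by omega) ((hcont _).mp hctt)
      simp only [lemarLoopA, if_pos hlt', Option.isNone_none, Bool.and_true, hct,
        Bool.false_eq_true, if_false]
      have e1 : ((jN : Int) + 1) = ((jN + 1 : Nat) : Int) := by push_cast; ring
      rw [hnext, e1]
      exact ih (jN + 1) _ _ _ (by omega) (by omega) (by omega) (by congr 1)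
        (pvMapSucc a m x0 jN seq hseq) (pvContainsInsert a m x0 jN _ seen hcont)
        (fun r hr1 hr2 => hmid r (by omega) hr2)

-- B's meeting loop returns none when no meeting exists before n.
theorem lemarMeet_no (a m x0 n : Int)
    (hno : ∀ k : Nat, 1 ≤ k → k < n.toNat → pvS a m x0 k ≠ pvS a m x0 (2 * k)) :
    ∀ (fuel jN : Nat) (tort hare : Int),
      n.toNat ≤ fuel + jN → 1 ≤ jN →
      tort = pvS a m x0 (jN - 1) → hare = pvS a m x0 (2 * (jN - 1)) →
      lemarMeet a m n fuel (jN : Int) tort hare = none := by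
  intro fuel
  induction fuel with
  | zero => intro jN tort hare _ _ _ _; rfl
  | succ fuel ih =>
    intro jN tort hare hf h1 ht hh
    by_cases hlt : jN < n.toNat
    · have hlt' : (jN : Int) < n := by omega
      simp only [lemarMeet, if_pos hlt']
      have ht' : PySem.Int.mod (a * tort) m = pvS a m x0 jN := by
        rw [ht, pvS_step]
        congr 1
        omega
      have hh' : PySem.Int.mod (a * PySem.Int.mod (a * hare) m) m = pvS a m x0 (2 * jN) := by
        rw [hh, pvS_step, pvS_step]
        congr 1
        omega
      have hne : (PySem.Int.mod (a * tort) m == PySem.Int.mod (a * PySem.Int.mod (a * hare) m) m) = false := by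
        rw [ht', hh']
        simp only [beq_eq_false_iff_ne, ne_eq]
        exact hno jN h1 hlt
      rw [hne]
      simp only [Bool.false_eq_true, if_false]
      have e1 : ((jN : Int) + 1) = ((jN + 1 : Nat) : Int) := by push_cast; ring
      rw [e1, ht', hh']
      exact ih (jN + 1) _ _ (by omega) (by omega) (by congr 1) (by congr 1)
    · have hlt' : ¬ ((jN : Int) < n) := by omega
      simp only [lemarMeet, if_neg hlt']

-- B's meeting loop returns the first meeting index K together with s K.
theorem lemarMeet_yes (a m x0 n : Int) (K : Nat) (hKN : K < n.toNat)
    (hK : pvS a m x0 K = pvS a m x0 (2 * K))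
    (hKmin : ∀ k : Nat, 1 ≤ k → k < K → pvS a m x0 k ≠ pvS a m x0 (2 * k)) :
    ∀ (fuel jN : Nat) (tort hare : Int),
      n.toNat ≤ fuel + jN → 1 ≤ jN → jN ≤ K →
      tort = pvS a m x0 (jN - 1) → hare = pvS a m x0 (2 * (jN - 1)) →
      lemarMeet a m n fuel (jN : Int) tort hare = some ((K : Int), pvS a m x0 K) := by
  intro fuel
  induction fuel with
  | zero => intro jN tort hare hf h1 hK2 _ _; omega
  | succ fuel ih =>
    intro jN tort hare hf h1 hjK ht hh
    have hlt' : (jN : Int) < n := by omega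
    simp only [lemarMeet, if_pos hlt']
    have ht' : PySem.Int.mod (a * tort) m = pvS a m x0 jN := by
      rw [ht, pvS_step]; congr 1; omega
    have hh' : PySem.Int.mod (a * PySem.Int.mod (a * hare) m) m = pvS a m x0 (2 * jN) := by
      rw [hh, pvS_step, pvS_step]; congr 1; omega
    by_cases hje : jN = K
    · subst hje
      have htr : (PySem.Int.mod (a * tort) m == PySem.Int.mod (a * PySem.Int.mod (a * hare) m) m) = true := by
        rw [ht', hh']
        simp only [beq_iff_eq]
        exact hK
      rw [htr]
      simp only [if_true, ht']
    · have hne : (PySem.Int.mod (a * tort) m == PySem.Int.mod (a * PySem.Int.mod (a * hare) m) m) = false := by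
        rw [ht', hh']
        simp only [beq_eq_false_iff_ne, ne_eq]
        exact hKmin jN h1 (by omega)
      rw [hne]
      simp only [Bool.false_eq_true, if_false]
      have e1 : ((jN : Int) + 1) = ((jN + 1 : Nat) : Int) := by push_cast; ring
      rw [e1, ht', hh']
      exact ih (jN + 1) _ _ (by omega) (by omega) (by omega) (by congr 1) (by congr 1)

-- B's mu walk returns (s mu, mu).
theorem lemarMu_spec (a m x0 : Int) (mu lam : Nat)
    (hcyc : pvS a m x0 (mu + lam) = pvS a m x0 mu) (hl1 : 1 ≤ lam)
    (hinj : ∀ i j : Nat, i < j → j < mu + lam → pvS a m x0 i ≠ pvS a m x0 j)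
    (k : Nat) (hdvd : lam ∣ k) (hmk : mu ≤ k) :
    ∀ (fuel j : Nat), mu ≤ fuel + j → j ≤ mu →
      lemarMu a m fuel (pvS a m x0 j) (pvS a m x0 (j + k)) j = (pvS a m x0 mu, mu) := by
  intro fuel
  induction fuel with
  | zero =>
    intro j hf hj
    have : j = mu := by omega
    subst this
    rfl
  | succ fuel ih =>
    intro j hf hj
    simp only [lemarMu]
    by_cases hje : j = mu
    · subst hje
      have htr : (pvS a m x0 j == pvS a m x0 (j + k)) = true := by
        simp only [beq_iff_eq]
        exact (pvMuIff a m x0 j lam hcyc hl1 hinj k hdvd hmk j).mpr (le_refl j)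
      rw [htr]
      simp
    · have hne : (pvS a m x0 j == pvS a m x0 (j + k)) = false := by
        simp only [beq_eq_false_iff_ne, ne_eq]
        intro h
        exact hje (by have := (pvMuIff a m x0 mu lam hcyc hl1 hinj k hdvd hmk j).mp h; omega)
      rw [hne]
      simp only [Bool.false_eq_true, if_false]
      have e1 := pvS_step a m x0 j
      have e2 : PySem.Int.mod (a * pvS a m x0 (j + k)) m = pvS a m x0 ((j + 1) + k) := by
        rw [show (j + 1) + k = (j + k) + 1 by omega, pvS_step]
      rw [e1, e2]
      exact ih (j + 1) (by omega) (by omega)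

-- B's lam walk returns lam.
theorem lemarLam_spec (a m x0 : Int) (mu lam : Nat)
    (hcyc : pvS a m x0 (mu + lam) = pvS a m x0 mu) (hl1 : 1 ≤ lam)
    (hinj : ∀ i j : Nat, i < j → j < mu + lam → pvS a m x0 i ≠ pvS a m x0 j) :
    ∀ (fuel l : Nat), lam ≤ fuel + l → 1 ≤ l → l ≤ lam →
      lemarLam a m fuel (pvS a m x0 (mu + l)) (pvS a m x0 mu) l = lam := by
  intro fuel
  induction fuel with
  | zero =>
    intro l hf h1 hl
    have : l = lam := by omega
    subst this
    rfl
  | succ fuel ih =>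
    intro l hf h1 hl
    simp only [lemarLam]
    by_cases hle : l = lam
    · subst hle
      have htr : (pvS a m x0 (mu + l) == pvS a m x0 mu) = true := by
        simp only [beq_iff_eq]; exact hcyc
      rw [htr]
      simp
    · have hne : (pvS a m x0 (mu + l) == pvS a m x0 mu) = false := by
        simp only [beq_eq_false_iff_ne, ne_eq]
        intro h
        exact hinj mu (mu + l) (by omega) (by omega) h.symm
      rw [hne]
      simp only [Bool.false_eq_true, if_false]
      have e1 : PySem.Int.mod (a * pvS a m x0 (mu + l)) m = pvS a m x0 (mu + (l + 1)) := by
        rw [show mu + (l + 1) = (mu + l) + 1 by omega, pvS_step]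
      rw [e1]
      exact ih (l + 1) (by omega) (by omega) (by omega)

-- B's generation loop produces the map of s over an initial segment.
theorem lemarGen_spec (a m x0 : Int) :
    ∀ (c j : Nat) (seq : List Int), seq = (List.range (j + 1)).map (pvS a m x0) →
      lemarGen a m c (pvS a m x0 j) seq = (List.range (j + 1 + c)).map (pvS a m x0) := by
  intro c
  induction c with
  | zero => intro j seq h; simpa [lemarGen] using h
  | succ c ih =>
    intro j seq h
    simp only [lemarGen]
    have e1 := pvS_step a m x0 j
    have hseq : seq ++ [pvS a m x0 (j + 1)] = (List.range (j + 1 + 1)).map (pvS a m x0) := by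
      have hr : (List.range ((j + 1) + 1)).map (pvS a m x0)
          = (List.range (j + 1)).map (pvS a m x0) ++ [pvS a m x0 (j + 1)] := by
        rw [List.range_succ]
        simp
      rw [h, hr]
    rw [e1, ih (j + 1) _ hseq]
    simp only [show j + 1 + 1 + c = j + 1 + (c + 1) from by omega]


-- When some repeat exists before n, a Floyd meeting point exists before n too.
theorem pvMeetExists (a m x0 n : Int) (R : Nat) (hPR : pvP a m x0 R)
    (hmin : ∀ r < R, ¬ pvP a m x0 r) (hRn : R < n.toNat) :
    ∃ k, 1 ≤ k ∧ k < n.toNat ∧ pvS a m x0 k = pvS a m x0 (2 * k) := by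
  obtain ⟨mu, hmuR, hmus⟩ := hPR
  have hRml : mu + (R - mu) = R := by omega
  have hcyc : pvS a m x0 (mu + (R - mu)) = pvS a m x0 mu := by rw [hRml]; exact hmus.symm
  have hdm := Nat.div_add_mod mu (R - mu)
  have hml : mu % (R - mu) < R - mu := Nat.mod_lt _ (by omega)
  have hcm : (mu / (R - mu) + 1) * (R - mu) = (R - mu) * (mu / (R - mu)) + (R - mu) := by ring
  refine ⟨(mu / (R - mu) + 1) * (R - mu), by omega, by omega, ?_⟩
  exact (pvMeetOf a m x0 mu (R - mu) hcyc _ ⟨mu / (R - mu) + 1, by ring⟩ (by omega)).symm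

-- If a repeat exists (first one at R), B's detection pipeline yields rp = R (cut at n).
theorem altRP_of_rep (a m x0 n : Int) (R : Nat) (hPR : pvP a m x0 R)
    (hmin : ∀ r < R, ¬ pvP a m x0 r)
    (hmex : ∃ k, 1 ≤ k ∧ k < n.toNat ∧ pvS a m x0 k = pvS a m x0 (2 * k)) :
    lemarRP a m n x0 (lemarMeet a m n n.toNat 1 x0 x0)
      = if (R : Int) < n then some (R : Int) else none := by
  classical
  obtain ⟨mu, hmuR, hmus⟩ := hPR
  have hRml : mu + (R - mu) = R := by omega
  have hcyc : pvS a m x0 (mu + (R - mu)) = pvS a m x0 mu := by rw [hRml]; exact hmus.symm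
  have hl1 : 1 ≤ R - mu := by omega
  have hinj : ∀ i j : Nat, i < j → j < mu + (R - mu) → pvS a m x0 i ≠ pvS a m x0 j := by
    intro i j hij hj he
    exact hmin j (by omega) ⟨i, hij, he⟩
  set K := Nat.find hmex with hKdef
  obtain ⟨hK1, hKN, hKm⟩ := Nat.find_spec hmex
  have hKmin : ∀ k : Nat, 1 ≤ k → k < K → pvS a m x0 k ≠ pvS a m x0 (2 * k) := by
    intro k h1 hk he
    exact Nat.find_min hmex hk ⟨h1, by omega, he⟩
  have hmeet := lemarMeet_yes a m x0 n K hKN hKm hKmin n.toNat 1 x0 x0 (by omega) (by omega)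
    (by omega) rfl rfl
  rw [Nat.cast_one] at hmeet
  obtain ⟨hKd, hKmu⟩ := pvDivMeet a m x0 mu (R - mu) hcyc hl1 hinj K hK1 hKm
  have hlamK : R - mu ≤ K := Nat.le_of_dvd (by omega) hKd
  have hmu := lemarMu_spec a m x0 mu (R - mu) hcyc hl1 hinj K hKd hKmu n.toNat 0 (by omega) (by omega)
  rw [Nat.zero_add] at hmu
  rw [show pvS a m x0 0 = x0 from rfl] at hmu
  have hlam := lemarLam_spec a m x0 mu (R - mu) hcyc hl1 hinj n.toNat 1 (by omega) (by omega) (by omega)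
  rw [hmeet]
  simp only [lemarRP]
  rw [hmu]
  dsimp only
  rw [pvS_step a m x0 mu, hlam]
  have hcast : ((mu : Int) + ((R - mu : Nat) : Int)) = ((R : Nat) : Int) := by omega
  rw [hcast]

-- ===== VERDICT (by name: the statement is the Claim_ definition above) =====
theorem lemar_modified_spec : Claim_equal_lemar_modified := by
  intro a m x0 n _ _
  unfold Spec_lemar_modified
  simp only [lemar_modified, lemar_modified_alt]
  classical
  have hseq1 : [x0] = (List.range 1).map (pvS a m x0) := by simp [pvS]
  have hcont1 : ∀ v : Int, ((PySem.Dict.empty.insert x0 (0 : Int)).contains v = true)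
      ↔ ∃ j < 1, pvS a m x0 j = v := by
    intro v
    rw [PySem.Dict.contains_insert]
    simp only [PySem.Dict.contains_empty, Bool.or_false, beq_iff_eq]
    constructor
    · intro h
      exact ⟨0, by omega, h.symm⟩
    · rintro ⟨j, hj, he⟩
      have hz : j = 0 := by omega
      rw [hz] at he
      exact he.symm
  have hgen : ∀ c : Nat, lemarGen a m c x0 [x0] = (List.range (1 + c)).map (pvS a m x0) := by
    intro c
    have h := lemarGen_spec a m x0 c 0 [x0] (by simp [pvS])
    rw [show pvS a m x0 0 = x0 from rfl] at h
    simpa using h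
  by_cases hex : ∃ r, pvP a m x0 r
  · set R := Nat.find hex with hRdef
    have hPR : pvP a m x0 R := Nat.find_spec hex
    have hmin : ∀ r < R, ¬ pvP a m x0 r := fun r hr => Nat.find_min hex hr
    have hR1 : 1 ≤ R := by
      obtain ⟨j, hj, _⟩ := hPR
      omega
    by_cases hRn : R < n.toNat
    · have hA := lemarLoopA_none_rep a m x0 n R hRn hPR n.toNat 1 x0 [x0]
        (PySem.Dict.empty.insert x0 0) (by omega) (by omega) (by omega) rfl hseq1 hcont1
        (fun r _ hr2 => hmin r hr2)
      rw [Nat.cast_one] at hA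
      have hrp := altRP_of_rep a m x0 n R hPR hmin (pvMeetExists a m x0 n R hPR hmin hRn)
      rw [if_pos (show (R : Int) < n by omega)] at hrp
      rw [hA, hrp]
      simp only [lemarLen]
      rw [hgen _]
      have hc : 1 + (max (min n ((R : Int) + 6)) 1 - 1).toNat = min n.toNat (R + 6) := by omega
      rw [hc]
    · have hA := lemarLoopA_none_no a m x0 n (fun r hr => hmin r (by omega)) n.toNat 1 x0 [x0]
        (PySem.Dict.empty.insert x0 0) (by omega) (by omega) rfl hseq1 hcont1
      rw [Nat.cast_one] at hA
      by_cases hmex : ∃ k, 1 ≤ k ∧ k < n.toNat ∧ pvS a m x0 k = pvS a m x0 (2 * k)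
      · have hrp := altRP_of_rep a m x0 n R hPR hmin hmex
        rw [if_neg (show ¬ ((R : Int) < n) by omega)] at hrp
        rw [hA, hrp]
        simp only [lemarLen]
        rw [hgen _]
        have hc : 1 + (max n 1 - 1).toNat = max n.toNat 1 := by omega
        rw [hc]
      · have hmeetn := lemarMeet_no a m x0 n
          (fun k h1 h2 he => hmex ⟨k, h1, h2, he⟩) n.toNat 1 x0 x0 (by omega) (by omega) rfl rfl
        rw [Nat.cast_one] at hmeetn
        rw [hA, hmeetn]
        simp only [lemarRP, lemarLen]
        rw [hgen _]
        have hc : 1 + (max n 1 - 1).toNat = max n.toNat 1 := by omega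
        rw [hc]
  · have hnoP : ∀ r, ¬ pvP a m x0 r := fun r h => hex ⟨r, h⟩
    have hA := lemarLoopA_none_no a m x0 n (fun r _ => hnoP r) n.toNat 1 x0 [x0]
      (PySem.Dict.empty.insert x0 0) (by omega) (by omega) rfl hseq1 hcont1
    rw [Nat.cast_one] at hA
    have hmeetn := lemarMeet_no a m x0 n
      (fun k h1 _ he => hnoP (2 * k) ⟨k, by omega, he⟩) n.toNat 1 x0 x0 (by omega) (by omega) rfl rfl
    rw [Nat.cast_one] at hmeetn
    rw [hA, hmeetn]
    simp only [lemarRP, lemarLen]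
    rw [hgen _]
    have hc : 1 + (max n 1 - 1).toNat = max n.toNat 1 := by omega
    rw [hc]
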